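-- pv_equiv track=rewrite | github.com/aass11011/zymNE | src/test/test.py | align_truth_pred
-- ===== SOURCE A (Python) =====
-- def find_index(array,x):
--     indexs = list()
--     for index,i in enumerate(array):
--         if i==x:
--             indexs+=[index]
--     return indexs
--
-- def align_truth_pred(trues,pred):
--     j_collection = set()
--     i_collection = set()
--     for i_index,i in enumerate(trues):
--         i_indexs = find_index(trues,i)
--         if i_index in i_collection:
--             continue
--         for j_index,j in enumerate(pred):
--             if j_index in j_collection:
--                 continue
--             else:
--                 j_indexs = find_index(pred,j)
--                 for x in j_indexs:
--                     pred[x] = i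
--                 for x in j_indexs:
--                     j_collection.add(x)
--                 break
--         for x in i_indexs:
--             i_collection.add(x)
--     return trues,pred
-- ===== SOURCE B (Python) =====
-- def align_truth_pred(trues, pred):
--     labels = list(dict.fromkeys(trues))
--     claimed = [False] * len(pred)
--     for lab in labels:
--         if all(claimed):
--             break
--         v = pred[claimed.index(False)]
--         claimed = [c or w == v for c, w in zip(claimed, pred)]
--         pred[:] = [lab if w == v else w for w in pred]
--     return trues, pred
-- ===== Notes on version B (the rewrite author's own statement) =====
-- stated objective: faster
-- what changed: Replaces A's triple-nested scans (find_index recomputed per element, index sets for bookkeeping) by a single dedup of trues and, per label, one zip pass that claims and relabels the first unclaimed group with a boolean claimed mask.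
import Mathlib
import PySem

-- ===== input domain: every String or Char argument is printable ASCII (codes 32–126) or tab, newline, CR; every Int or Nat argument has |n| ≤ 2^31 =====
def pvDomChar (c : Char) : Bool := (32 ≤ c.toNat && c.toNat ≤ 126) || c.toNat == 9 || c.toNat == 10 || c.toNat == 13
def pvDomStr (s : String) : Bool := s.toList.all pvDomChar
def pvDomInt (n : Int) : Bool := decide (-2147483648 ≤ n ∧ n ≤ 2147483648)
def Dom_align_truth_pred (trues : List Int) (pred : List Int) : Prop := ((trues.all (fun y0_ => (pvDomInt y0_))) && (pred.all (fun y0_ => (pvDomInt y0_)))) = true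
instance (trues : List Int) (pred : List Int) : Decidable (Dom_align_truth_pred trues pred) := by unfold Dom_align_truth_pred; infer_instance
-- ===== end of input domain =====

-- B dedups trues once and, per label, claims and relabels the first unclaimed group of pred
-- with one pass over a boolean mask, replacing A's repeated index scans (objective: faster).
-- A mutates `pred` in place and B performs the same mutation (pred[:] = ...); the theorems
-- are about the returned value.

-- ===== PORT A =====
def find_index (array : List Int) (x : Int) : List Int :=
  (PySem.List.enumerate array).foldl
    (fun indexs p => if p.2 == x then indexs ++ [p.1] else indexs) []

def alignInner (i : Int) (items : List (Int × Int)) (pred : List Int)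
    (jcoll : PySem.Set Int) : List Int × PySem.Set Int :=
  match items with
  | [] => (pred, jcoll)
  | p :: rest =>
    if jcoll.contains p.1 then alignInner i rest pred jcoll
    else
      let jIndexs := find_index pred p.2
      let pred' := jIndexs.foldl (fun pr x => PySem.List.pySetD pr x i) pred
      let jcoll' := jIndexs.foldl (fun s x => s.add x) jcoll
      (pred', jcoll')

def alignStep (trues : List Int) (st : List Int × PySem.Set Int × PySem.Set Int)
    (q : Int × Int) : List Int × PySem.Set Int × PySem.Set Int :=
  let iIndexs := find_index trues q.2
  if st.2.2.contains q.1 then st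
  else
    let inner := alignInner q.2 (PySem.List.enumerate st.1) st.1 st.2.1
    (inner.1, inner.2, iIndexs.foldl (fun s x => s.add x) st.2.2)

def align_truth_pred (trues : List Int) (pred : List Int) : List Int × List Int :=
  let final := (PySem.List.enumerate trues).foldl (alignStep trues)
    (pred, ([] : PySem.Set Int), ([] : PySem.Set Int))
  (trues, final.1)

-- ===== PORT B =====
/-- the `for lab in labels:` loop of B over (pred, claimed); `break` returns the state. -/
def altLoop (labels : List Int) (pred : List Int) (claimed : List Bool) :
    List Int × List Bool :=
  match labels with
  | [] => (pred, claimed)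
  | lab :: rest =>
    if claimed.all (fun c => c) then (pred, claimed)
    else
      let v := pred.getD (List.idxOf false claimed) 0
      let claimed' := (claimed.zip pred).map (fun p => p.1 || decide (p.2 = v))
      let pred' := pred.map (fun w => if w = v then lab else w)
      altLoop rest pred' claimed'

def align_truth_pred_alt (trues : List Int) (pred : List Int) : List Int × List Int :=
  let labels := PySem.Set.ofList trues
  (trues, (altLoop labels pred (List.replicate pred.length false)).1)

-- ===== PRECONDITION & SPEC =====
def Spec_align_truth_pred (trues : List Int) (pred : List Int) (out : List Int × List Int) : Prop := out = align_truth_pred_alt trues pred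
instance (trues : List Int) (pred : List Int) (out : List Int × List Int) : Decidable (Spec_align_truth_pred trues pred out) := by unfold Spec_align_truth_pred; infer_instance

-- ===== CLAIM (what is proved, stated in full; the proofs are below) =====
def Claim_equal_align_truth_pred : Prop := ∀ (trues : List Int) (pred : List Int), Dom_align_truth_pred trues pred → Spec_align_truth_pred trues pred (align_truth_pred trues pred)

-- ===== LEMMAS AND PROOFS =====

lemma fi_eq (xs : List Int) (x : Int) :
    find_index xs x = ((PySem.List.enumerate xs).filter (fun p => p.2 == x)).map (·.1) := by
  unfold find_index
  simpa using PySem.List.foldl_append_if (fun (p : Int × Int) => p.2 == x) (fun p => p.1)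
    (PySem.List.enumerate xs) []

lemma mem_fi (xs : List Int) (x y : Int) :
    y ∈ find_index xs x ↔ ∃ p : Nat, p < xs.length ∧ y = (p : Int) ∧ xs.getD p 0 = x := by
  rw [fi_eq]
  simp only [List.mem_map, List.mem_filter, PySem.List.mem_enumerate_iff]
  constructor
  · rintro ⟨p, ⟨⟨k, hk, rfl⟩, hx⟩, rfl⟩
    refine ⟨k, hk, by simp, ?_⟩
    rw [List.getD_eq_getElem _ _ hk]
    simpa using hx
  · rintro ⟨p, hp, rfl, hx⟩
    refine ⟨((p : Int), xs[p]), ⟨⟨p, hp, by simp⟩, ?_⟩, rfl⟩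
    rw [List.getD_eq_getElem _ _ hp] at hx
    simpa using hx

lemma fi_bound (xs : List Int) (x y : Int) (h : y ∈ find_index xs x) :
    0 ≤ y ∧ y.toNat < xs.length := by
  obtain ⟨p, hp, rfl, -⟩ := (mem_fi xs x y).mp h
  simp [hp]

lemma foldl_set_append (idxs : List Int) (xs : List Int) (y i : Int)
    (h : ∀ z ∈ idxs, 0 ≤ z ∧ z.toNat < xs.length) :
    idxs.foldl (fun pr z => PySem.List.pySetD pr z i) (xs ++ [y])
      = (idxs.foldl (fun pr z => PySem.List.pySetD pr z i) xs) ++ [y] := by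
  induction idxs generalizing xs with
  | nil => simp
  | cons z idxs ih =>
    obtain ⟨h0, h1⟩ := h z (by simp)
    simp only [List.foldl_cons]
    rw [PySem.List.pySetD_of_nonneg _ _ h0, PySem.List.pySetD_of_nonneg _ _ h0,
      List.set_append, if_pos h1]
    exact ih _ (fun w hw => by simpa [List.length_set] using h w (by simp [hw]))

lemma fi_snoc (xs : List Int) (y j : Int) :
    find_index (xs ++ [y]) j
      = find_index xs j ++ (if y == j then [(xs.length : Int)] else []) := by
  rw [fi_eq, fi_eq, PySem.List.enumerate_append]
  by_cases h : y = j <;>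
    simp [List.filter_append, PySem.List.enumerate, h]

lemma fi_foldl_set (xs : List Int) (j i : Int) :
    (find_index xs j).foldl (fun pr z => PySem.List.pySetD pr z i) xs
      = xs.map (fun w => if w = j then i else w) := by
  induction xs using List.reverseRecOn with
  | nil => simp [find_index, PySem.List.enumerate]
  | append_singleton xs y ih =>
    rw [fi_snoc]
    by_cases hy : y = j
    · rw [if_pos (by simpa using hy), List.foldl_append]
      rw [foldl_set_append _ _ _ _ (fun z hz => fi_bound xs j z hz), ih]
      simp only [List.foldl_cons, List.foldl_nil]
      rw [PySem.List.pySetD_of_nonneg _ _ (by positivity), List.set_append]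
      simp [hy]
    · rw [if_neg (by simpa using hy), List.append_nil]
      rw [foldl_set_append _ _ _ _ (fun z hz => fi_bound xs j z hz), ih]
      simp [hy]

lemma inner_all (i : Int) (l : List (Int × Int)) (pr : List Int) (jc : PySem.Set Int)
    (h : ∀ p ∈ l, jc.contains p.1 = true) : alignInner i l pr jc = (pr, jc) := by
  induction l with
  | nil => rfl
  | cons p rest ih =>
    rw [alignInner, if_pos (h p (by simp))]
    exact ih (fun q hq => h q (by simp [hq]))

lemma inner_reach (i : Int) (l1 l2 : List (Int × Int)) (q : Int × Int) (pr : List Int)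
    (jc : PySem.Set Int) (h1 : ∀ p ∈ l1, jc.contains p.1 = true)
    (h2 : ¬ jc.contains q.1 = true) :
    alignInner i (l1 ++ q :: l2) pr jc
      = ((find_index pr q.2).foldl (fun a z => PySem.List.pySetD a z i) pr,
         (find_index pr q.2).foldl (fun s z => PySem.Set.add s z) jc) := by
  induction l1 with
  | nil => rw [List.nil_append, alignInner, if_neg h2]
  | cons p rest ih =>
    rw [List.cons_append, alignInner, if_pos (h1 p (by simp))]
    exact ih (fun w hw => h1 w (by simp [hw]))

lemma ofList_prefix (P R : List Int) :
    ∃ ext, PySem.Set.ofList (P ++ R) = PySem.Set.ofList P ++ ext := by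
  exact ⟨_, by rw [PySem.Set.ofList_append, PySem.Set.update_eq_append_filter]⟩

lemma ofList_snoc_not_mem (P : List Int) (v : Int) (h : v ∉ P) :
    PySem.Set.ofList (P ++ [v]) = PySem.Set.ofList P ++ [v] := by
  rw [PySem.Set.ofList_append_singleton, PySem.Set.add,
    if_neg (by simpa [PySem.Set.contains_iff, PySem.Set.mem_ofList] using h)]

lemma ofList_snoc_mem (P : List Int) (v : Int) (h : v ∈ P) :
    PySem.Set.ofList (P ++ [v]) = PySem.Set.ofList P := by
  rw [PySem.Set.ofList_append_singleton, PySem.Set.add,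
    if_pos (by simpa [PySem.Set.contains_iff, PySem.Set.mem_ofList] using h)]

lemma ic_update (trues P : List Int) (v : Int) (ic : PySem.Set Int)
    (hi : ∀ x : Int, x ∈ ic ↔ ∃ k : Nat, k < trues.length ∧ x = (k : Int) ∧ trues.getD k 0 ∈ P) :
    ∀ x : Int, x ∈ (find_index trues v).foldl (fun s z => PySem.Set.add s z) ic ↔
      ∃ k : Nat, k < trues.length ∧ x = (k : Int) ∧ trues.getD k 0 ∈ P ++ [v] := by
  intro x
  rw [PySem.Set.mem_foldl_add (find_index trues v) (fun z => z) ic x]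
  constructor
  · rintro (hx | ⟨b, hb, rfl⟩)
    · obtain ⟨k, hk, rfl, hm⟩ := (hi _).mp hx
      exact ⟨k, hk, rfl, List.mem_append_left _ hm⟩
    · obtain ⟨p, hp, rfl, he⟩ := (mem_fi _ _ _).mp hb
      exact ⟨p, hp, rfl, List.mem_append_right _ (List.mem_singleton.mpr he)⟩
  · rintro ⟨k, hk, rfl, hm⟩
    rcases List.mem_append.mp hm with hm | hm
    · exact Or.inl ((hi _).mpr ⟨k, hk, rfl, hm⟩)
    · exact Or.inr ⟨(k : Int), (mem_fi _ _ _).mpr ⟨k, hk, rfl, by simpa using hm⟩, rfl⟩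

/-- properties of `claimed.index(False)` when some entry is unclaimed. -/
lemma idxOf_false_spec (claimed : List Bool) (h : false ∈ claimed) :
    List.idxOf false claimed < claimed.length ∧
    claimed.getD (List.idxOf false claimed) true = false ∧
    ∀ k < List.idxOf false claimed, claimed.getD k false = true := by
  induction claimed with
  | nil => simp at h
  | cons c cs ih =>
    cases c with
    | false => simp
    | true =>
      have hm : false ∈ cs := by simpa using h
      obtain ⟨h1, h2, h3⟩ := ih hm
      have hidx : List.idxOf false (true :: cs) = List.idxOf false cs + 1 := by
        simp
      refine ⟨by simpa [hidx] using Nat.succ_lt_succ h1, by simpa [hidx] using h2, ?_⟩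
      intro k hk
      rw [hidx] at hk
      cases k with
      | zero => simp
      | succ k => simpa using h3 k (by omega)

/-- once every index of pred is claimed, the remaining outer steps of A never change pred. -/
lemma fold_all_claimed (l : List (Int × Int)) (trues pred : List Int)
    (jc : PySem.Set Int)
    (hc : ∀ k : Nat, k < pred.length → (k : Int) ∈ jc) :
    ∀ ic : PySem.Set Int, (l.foldl (alignStep trues) (pred, jc, ic)).1 = pred := by
  induction l with
  | nil => intro ic; rfl
  | cons q l ih =>
    intro ic
    rw [List.foldl_cons]
    by_cases hsk : PySem.Set.contains ic q.1 = true
    · have : alignStep trues (pred, jc, ic) q = (pred, jc, ic) := by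
        simp only [alignStep]
        rw [if_pos hsk]
      rw [this]; exact ih ic
    · have hall : ∀ p ∈ PySem.List.enumerate pred, jc.contains p.1 = true := by
        intro p hp
        rw [PySem.List.mem_enumerate_iff] at hp
        obtain ⟨k, hk, rfl⟩ := hp
        rw [PySem.Set.contains_iff]
        simpa using hc k hk
      have : alignStep trues (pred, jc, ic) q
          = (pred, jc, (find_index trues q.2).foldl (fun s z => PySem.Set.add s z) ic) := by
        simp only [alignStep]
        rw [if_neg hsk, inner_all q.2 _ pred jc hall]
      rw [this]; exact ih _

lemma getD_zip_map (claimed : List Bool) (pred : List Int) (v : Int) (k : Nat)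
    (hk : k < pred.length) (hlen : claimed.length = pred.length) :
    ((claimed.zip pred).map (fun p => p.1 || decide (p.2 = v))).getD k false
      = (claimed.getD k false || decide (pred.getD k 0 = v)) := by
  have hk' : k < claimed.length := by omega
  have hkz : k < (claimed.zip pred).length := by rw [List.length_zip]; omega
  rw [List.getD_eq_getElem _ _ (by simpa using hkz), List.getElem_map,
    List.getElem_zip, List.getD_eq_getElem _ _ hk', List.getD_eq_getElem _ _ hk]

/-- main correspondence: A's remaining outer fold computes the same pred as
    B's remaining label loop, given the bookkeeping invariants. -/
lemma outer_main (rest : List Int) : ∀ (P trues pred : List Int) (claimed : List Bool)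
    (jc ic : PySem.Set Int) (ext : List Int),
    trues = P ++ rest →
    PySem.Set.ofList trues = PySem.Set.ofList P ++ ext →
    claimed.length = pred.length →
    (∀ k : Nat, k < pred.length → (((k : Int) ∈ jc) ↔ claimed.getD k false = true)) →
    (∀ x : Int, x ∈ ic ↔ ∃ k : Nat, k < trues.length ∧ x = (k : Int) ∧ trues.getD k 0 ∈ P) →
    ((PySem.List.enumerate rest (P.length : Int)).foldl (alignStep trues) (pred, jc, ic)).1
      = (altLoop ext pred claimed).1 := by
  induction rest with
  | nil =>
    intro P trues pred claimed jc ic ext hT hext hlen hj hi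
    have hP : trues = P := by simpa using hT
    subst hP
    have hx : ext = [] := by simpa using hext.symm
    subst hx
    simp [PySem.List.enumerate, altLoop]
  | cons v rest ih =>
    intro P trues pred claimed jc ic ext hT hext hlen hj hi
    rw [PySem.List.enumerate_cons, List.foldl_cons]
    have hT' : trues = (P ++ [v]) ++ rest := by
      rw [hT, List.append_assoc, List.singleton_append]
    by_cases hv : v ∈ P
    · -- this trues entry was already processed: A skips, B's label list is unchanged
      have hct : PySem.Set.contains ic (P.length : Int) = true := by
        rw [PySem.Set.contains_iff]
        refine (hi _).mpr ⟨P.length, by rw [hT]; simp, rfl, ?_⟩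
        rw [hT, List.getD_eq_getElem _ _ (by simp),
          List.getElem_append_right (le_refl _)]
        simpa using hv
      have hskip : alignStep trues (pred, jc, ic) ((P.length : Int), v) = (pred, jc, ic) := by
        simp only [alignStep]
        rw [if_pos hct]
      rw [hskip]
      have hofl : PySem.Set.ofList (P ++ [v]) = PySem.Set.ofList P := ofList_snoc_mem P v hv
      have hi' : ∀ x : Int, x ∈ ic ↔ ∃ k : Nat, k < trues.length ∧ x = (k : Int) ∧
          trues.getD k 0 ∈ P ++ [v] := by
        intro x
        rw [hi x]
        constructor
        · rintro ⟨k, hk, rfl, hm⟩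
          exact ⟨k, hk, rfl, List.mem_append_left _ hm⟩
        · rintro ⟨k, hk, rfl, hm⟩
          rcases List.mem_append.mp hm with hm | hm
          · exact ⟨k, hk, rfl, hm⟩
          · exact ⟨k, hk, rfl, by rwa [List.mem_singleton.mp hm]⟩
      have := ih (P ++ [v]) trues pred claimed jc ic ext hT' (by rw [hofl]; exact hext)
        hlen hj hi'
      have hlenE : ((P ++ [v]).length : Int) = (P.length : Int) + 1 := by
        push_cast [List.length_append, List.length_singleton]
        ring
      rw [hlenE] at this
      exact this
    · -- a new label v: A fires a step, B processes the head of its label list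
      have hcf : ¬ PySem.Set.contains ic (P.length : Int) = true := by
        rw [PySem.Set.contains_iff]
        intro hmem
        obtain ⟨k, hk, he, hm⟩ := (hi _).mp hmem
        have hkP : k = P.length := by exact_mod_cast he.symm
        rw [hkP, hT, List.getD_eq_getElem _ _ (by simp),
          List.getElem_append_right (le_refl _)] at hm
        simp at hm
        exact hv hm
      have hofl : PySem.Set.ofList (P ++ [v]) = PySem.Set.ofList P ++ [v] :=
        ofList_snoc_not_mem P v hv
      -- the head of ext is v
      obtain ⟨ext2, hext2⟩ : ∃ ext2, ext = v :: ext2 ∧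
          PySem.Set.ofList trues = PySem.Set.ofList (P ++ [v]) ++ ext2 := by
        obtain ⟨e2, he2⟩ := ofList_prefix (P ++ [v]) rest
        rw [← hT'] at he2
        refine ⟨e2, ?_, he2⟩
        have : PySem.Set.ofList P ++ ext = (PySem.Set.ofList P ++ [v]) ++ e2 := by
          rw [← hext, he2, hofl]
        rw [List.append_assoc, List.singleton_append] at this
        exact List.append_cancel_left this
      obtain ⟨hextv, hext2'⟩ := hext2
      subst hextv
      have hi' := ic_update trues P v ic hi
      have hlenE : ((P ++ [v]).length : Int) = (P.length : Int) + 1 := by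
        push_cast [List.length_append, List.length_singleton]
        ring
      by_cases hall : claimed.all (fun c => c) = true
      · -- everything claimed: B breaks; A's firing step (and all later ones) leave pred alone
        have hcall : ∀ k : Nat, k < pred.length → (k : Int) ∈ jc := by
          intro k hk
          refine (hj k hk).mpr ?_
          have hk' : k < claimed.length := by omega
          have := List.all_eq_true.mp hall claimed[k] (List.getElem_mem hk')
          rw [List.getD_eq_getElem _ _ hk']
          simpa using this
        have haen : ∀ p ∈ PySem.List.enumerate pred, jc.contains p.1 = true := by
          intro p hp
          rw [PySem.List.mem_enumerate_iff] at hp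
          obtain ⟨k, hk, rfl⟩ := hp
          rw [PySem.Set.contains_iff]
          simpa using hcall k hk
        have hstep : alignStep trues (pred, jc, ic) ((P.length : Int), v)
            = (pred, jc, (find_index trues v).foldl (fun s z => PySem.Set.add s z) ic) := by
          simp only [alignStep]
          rw [if_neg hcf, inner_all v _ pred jc haen]
        rw [hstep, altLoop, if_pos hall]
        exact fold_all_claimed _ trues pred jc hcall _
      · -- some index unclaimed: both relabel the first unclaimed group to v
        have hfm : false ∈ claimed := by
          rcases List.all_eq_false.mp (Bool.eq_false_iff.mpr hall) with ⟨c, hc, hcf'⟩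
          have : c = false := by revert hcf'; simp
          rwa [← this]
        obtain ⟨hjlt, hjval, hjmin⟩ := idxOf_false_spec claimed hfm
        have hjlt' : List.idxOf false claimed < pred.length := by omega
        -- the value relabelled
        have hv0 : pred.getD (List.idxOf false claimed) 0
            = pred[List.idxOf false claimed]'hjlt' := List.getD_eq_getElem _ _ hjlt'
        -- split enumerate pred at the first unclaimed index
        have hdecomp : pred = pred.take (List.idxOf false claimed)
            ++ pred[List.idxOf false claimed]'hjlt'
              :: pred.drop (List.idxOf false claimed + 1) := by
          rw [← List.drop_eq_getElem_cons hjlt', List.take_append_drop]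
        have henum : PySem.List.enumerate pred 0
            = PySem.List.enumerate (pred.take (List.idxOf false claimed)) 0
              ++ ((List.idxOf false claimed : Int), pred[List.idxOf false claimed]'hjlt')
                :: PySem.List.enumerate (pred.drop (List.idxOf false claimed + 1))
                    ((List.idxOf false claimed : Int) + 1) := by
          conv_lhs => rw [hdecomp]
          rw [PySem.List.enumerate_append, PySem.List.enumerate_cons]
          have hlt : (pred.take (List.idxOf false claimed)).length
              = List.idxOf false claimed := by
            rw [List.length_take]; omega
          rw [hlt]
          norm_num
        have h1 : ∀ p ∈ PySem.List.enumerate (pred.take (List.idxOf false claimed)) 0,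
            jc.contains p.1 = true := by
          intro p hp
          rw [PySem.List.mem_enumerate_iff] at hp
          obtain ⟨k, hk, rfl⟩ := hp
          have hkj : k < List.idxOf false claimed := by
            rw [List.length_take] at hk; omega
          rw [PySem.Set.contains_iff]
          simp only [zero_add]
          exact (hj k (by omega)).mpr (hjmin k hkj)
        have h2 : ¬ jc.contains ((List.idxOf false claimed : Int)) = true := by
          rw [PySem.Set.contains_iff]
          intro hmem
          have hct := (hj _ hjlt').mp hmem
          have hff : claimed.getD (List.idxOf false claimed) false = false := by
            rw [List.getD_eq_getElem _ _ hjlt]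
            rw [List.getD_eq_getElem _ _ hjlt] at hjval
            exact hjval
          rw [hct] at hff
          simp at hff
        have hstep : alignStep trues (pred, jc, ic) ((P.length : Int), v)
            = ((find_index pred (pred[List.idxOf false claimed]'hjlt')).foldl
                  (fun a z => PySem.List.pySetD a z v) pred,
               (find_index pred (pred[List.idxOf false claimed]'hjlt')).foldl
                  (fun s z => PySem.Set.add s z) jc,
               (find_index trues v).foldl (fun s z => PySem.Set.add s z) ic) := by
          simp only [alignStep]
          rw [if_neg hcf]
          have := inner_reach v
            (PySem.List.enumerate (pred.take (List.idxOf false claimed)) 0)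
            (PySem.List.enumerate (pred.drop (List.idxOf false claimed + 1))
              ((List.idxOf false claimed : Int) + 1))
            ((List.idxOf false claimed : Int), pred[List.idxOf false claimed]'hjlt')
            pred jc h1 h2
          rw [show PySem.List.enumerate pred = PySem.List.enumerate pred 0 from rfl, henum,
            this]
        rw [hstep, fi_foldl_set]
        -- B's step
        have hBstep : altLoop (v :: ext2) pred claimed
            = altLoop ext2
                (pred.map (fun w => if w = pred.getD (List.idxOf false claimed) 0 then v else w))
                ((claimed.zip pred).map
                  (fun p => p.1 || decide (p.2 = pred.getD (List.idxOf false claimed) 0))) := by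
          rw [altLoop, if_neg hall]
        rw [hBstep, ← hv0]
        -- invariants for the IH
        have hlen' : ((claimed.zip pred).map
            (fun p => p.1 || decide (p.2 = pred.getD (List.idxOf false claimed) 0))).length
            = (pred.map (fun w => if w = pred.getD (List.idxOf false claimed) 0 then v else w)).length := by
          rw [List.length_map, List.length_zip, List.length_map]
          omega
        have hj' : ∀ k : Nat,
            k < (pred.map (fun w => if w = pred.getD (List.idxOf false claimed) 0 then v else w)).length →
            (((k : Int)) ∈ (find_index pred (pred.getD (List.idxOf false claimed) 0)).foldl
                (fun s z => PySem.Set.add s z) jc ↔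
              ((claimed.zip pred).map
                (fun p => p.1 || decide (p.2 = pred.getD (List.idxOf false claimed) 0))).getD k false = true) := by
          intro k hk
          rw [List.length_map] at hk
          rw [PySem.Set.mem_foldl_add _ (fun z => z) jc _,
            getD_zip_map claimed pred _ k hk hlen]
          constructor
          · rintro (hx | ⟨b, hb, rfl⟩)
            · rw [(hj k hk).mp hx]; simp
            · obtain ⟨p, hp, he, hval⟩ := (mem_fi _ _ _).mp hb
              have : p = k := by exact_mod_cast he.symm
              subst this
              simp only [Bool.or_eq_true, decide_eq_true_eq]
              exact Or.inr hval
          · intro hor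
            rcases Bool.or_eq_true_iff.mp hor with hc | hp
            · exact Or.inl ((hj k hk).mpr hc)
            · exact Or.inr ⟨(k : Int),
                (mem_fi _ _ _).mpr ⟨k, hk, rfl, by simpa using hp⟩, rfl⟩
        have := ih (P ++ [v]) trues
          (pred.map (fun w => if w = pred.getD (List.idxOf false claimed) 0 then v else w))
          ((claimed.zip pred).map
            (fun p => p.1 || decide (p.2 = pred.getD (List.idxOf false claimed) 0)))
          ((find_index pred (pred.getD (List.idxOf false claimed) 0)).foldl
            (fun s z => PySem.Set.add s z) jc)
          ((find_index trues v).foldl (fun s z => PySem.Set.add s z) ic)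
          ext2 hT' hext2' hlen' hj' hi'
        rw [hlenE] at this
        exact this

-- ===== VERDICT (by name: the statement is the Claim_ definition above) =====
theorem align_truth_pred_spec : Claim_equal_align_truth_pred := by
  unfold Claim_equal_align_truth_pred
  intro trues pred _
  unfold Spec_align_truth_pred align_truth_pred align_truth_pred_alt
  dsimp only
  have hmain := outer_main trues [] trues pred (List.replicate pred.length false) [] []
    (PySem.Set.ofList trues) (by simp)
    (by simp [PySem.Set.ofList]) (by simp)
    (fun k hk => by simp)
    (by simp)
  simp only [List.length_nil, Nat.cast_zero] at hmain
  rw [Prod.mk.injEq]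
  exact ⟨rfl, hmain⟩
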